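-- pv_equiv track=rewrite | github.com/SethDrew/led | audio-reactive/effects/absint_sections.py | fibonacci_sections
-- ===== SOURCE A (Python) =====
-- def fibonacci_sections(total_leds):
--     """Generate Fibonacci-sized sections that fit in total_leds.
--     Returns list of (start, end, section_index) from start of strip."""
--     # Generate Fibonacci sequence: 1, 2, 3, 5, 8, 13, 21, 34, 55, ...
--     fibs = [1, 2]
--     while fibs[-1] + fibs[-2] <= total_leds:
--         fibs.append(fibs[-1] + fibs[-2])
--
--     # Build sections from the END of the strip (smallest at tip)
--     sections = []
--     pos = total_leds  # start from end
--     for i, size in enumerate(fibs):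
--         if pos <= 0:
--             break
--         start = max(0, pos - size)
--         sections.append((start, pos, i))
--         pos = start
--
--     # If LEDs remain at the start, extend the last (largest) section
--     if pos > 0 and sections:
--         last_start, last_end, last_idx = sections[-1]
--         sections[-1] = (0, last_end, last_idx)
--
--     return sections
-- ===== SOURCE B (Python) =====
-- def fibonacci_sections(total_leds):
--     """Generate Fibonacci-sized sections that fit in total_leds.
--     Returns list of (start, end, section_index) from start of strip."""
--     sections = []
--     pos = total_leds
--     a, b = 1, 2
--     i = 0
--     while pos > 0:
--         start = max(0, pos - a)
--         sections.append((start, pos, i))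
--         pos = start
--         i += 1
--         a, b = b, a + b
--     return sections
-- ===== Notes on version B (the rewrite author's own statement) =====
-- stated objective: simpler
-- what changed: B fuses A's two passes (precompute a Fibonacci list, then walk it) into one while-loop with two rolling Fibonacci variables, and drops A's trailing 'extend last section' branch, which is dead because the generated Fibonacci sizes always sum past total_leds.
import Mathlib
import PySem

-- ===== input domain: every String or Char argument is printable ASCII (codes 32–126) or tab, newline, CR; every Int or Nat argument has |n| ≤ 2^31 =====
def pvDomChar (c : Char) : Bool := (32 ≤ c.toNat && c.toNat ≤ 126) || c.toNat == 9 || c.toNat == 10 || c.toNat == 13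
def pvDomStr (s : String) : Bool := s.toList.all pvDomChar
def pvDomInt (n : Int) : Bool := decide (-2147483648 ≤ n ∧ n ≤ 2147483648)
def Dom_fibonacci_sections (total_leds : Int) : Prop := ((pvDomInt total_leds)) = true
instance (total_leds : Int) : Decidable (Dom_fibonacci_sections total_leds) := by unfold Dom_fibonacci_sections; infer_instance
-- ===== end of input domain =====

-- B fuses A's two passes into one rolling-variable loop and drops A's dead 'extend last section' branch; objective: simpler.

-- ===== PORT A =====
-- while fibs[-1] + fibs[-2] <= total_leds: fibs.append(...).  The fuel only makes the
-- loop total; within Dom the loop always stops before 64 iterations (proved below).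
def pvFibLoopA (fuel : Nat) (total_leds : Int) (fibs : List Int) : List Int :=
  match fuel with
  | 0 => fibs
  | fuel + 1 =>
    match PySem.List.pyGet? fibs (-1), PySem.List.pyGet? fibs (-2) with
    | some x, some y =>
      if x + y ≤ total_leds then pvFibLoopA fuel total_leds (fibs ++ [x + y]) else fibs
    | _, _ => fibs

-- for i, size in enumerate(fibs): if pos <= 0: break; ...  Returns (sections, pos).
def pvSecLoopA : List Int → Int → Int → List (Int × Int × Int) → (List (Int × Int × Int)) × Int
  | [], _, pos, sections => (sections, pos)
  | size :: rest, i, pos, sections =>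
    if pos ≤ 0 then (sections, pos)
    else
      let start := max 0 (pos - size)
      pvSecLoopA rest (i + 1) start (sections ++ [(start, pos, i)])

def fibonacci_sections (total_leds : Int) : List (Int × Int × Int) :=
  let fibs := pvFibLoopA 64 total_leds [1, 2]
  let r := pvSecLoopA fibs 0 total_leds []
  let sections := r.1
  let pos := r.2
  if pos > 0 ∧ sections ≠ [] then
    match sections.getLast? with
    | some (_, last_end, last_idx) => sections.dropLast ++ [(0, last_end, last_idx)]
    | none => sections
  else sections

-- ===== PORT B =====
-- while pos > 0: one rolling Fibonacci pair (a, b).  The fuel only makes the loop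
-- total; within Dom the loop stops (pos hits 0) before 65 iterations (proved below).
def pvAltLoop (fuel : Nat) (pos a b i : Int) (sections : List (Int × Int × Int)) : List (Int × Int × Int) :=
  match fuel with
  | 0 => sections
  | fuel + 1 =>
    if pos > 0 then
      let start := max 0 (pos - a)
      pvAltLoop fuel start b (a + b) (i + 1) (sections ++ [(start, pos, i)])
    else sections

def fibonacci_sections_alt (total_leds : Int) : List (Int × Int × Int) :=
  pvAltLoop 65 total_leds 1 2 0 []

-- ===== PRECONDITION & SPEC =====
def Spec_fibonacci_sections (total_leds : Int) (out : List (Int × Int × Int)) : Prop := out = fibonacci_sections_alt total_leds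
instance (total_leds : Int) (out : List (Int × Int × Int)) : Decidable (Spec_fibonacci_sections total_leds out) := by unfold Spec_fibonacci_sections; infer_instance

-- ===== CLAIM (what is proved, stated in full; the proofs are below) =====
def Claim_equal_fibonacci_sections : Prop := ∀ (total_leds : Int), Dom_fibonacci_sections total_leds → Spec_fibonacci_sections total_leds (fibonacci_sections total_leds)

-- ===== LEMMAS AND PROOFS =====

-- The tail of the Fibonacci list A builds, seen from its last two elements (y = prev, x = last).
def pvGen (fuel : Nat) (total y x : Int) : List Int :=
  match fuel with
  | 0 => []
  | f + 1 => if x + y ≤ total then (x + y) :: pvGen f total x (x + y) else []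

-- The element the generator would reach after `fuel` more steps (a strict upper bound for total).
def pvGenBound (fuel : Nat) (a b : Int) : Int :=
  match fuel with
  | 0 => a
  | f + 1 => pvGenBound f b (a + b)

lemma pvFibLoopA_eq (fuel : Nat) (total : Int) :
    ∀ (l : List Int) (y x : Int),
      pvFibLoopA fuel total (l ++ [y, x]) = (l ++ [y, x]) ++ pvGen fuel total y x := by
  induction fuel with
  | zero => intro l y x; simp [pvFibLoopA, pvGen]
  | succ f ih =>
    intro l y x
    have h1 : PySem.List.pyGet? (l ++ [y, x]) (-1) = some x := by
      have : l ++ [y, x] = (l ++ [y]) ++ [x] := by simp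
      rw [this, PySem.List.pyGet?_neg_one_append_singleton]
    have h2 : PySem.List.pyGet? (l ++ [y, x]) (-2) = some y := by
      rw [PySem.List.pyGet?_neg_ofNat (l ++ [y, x]) 2 (by omega) (by simp)]
      simp
    rw [pvFibLoopA, h1, h2]
    by_cases hc : x + y ≤ total
    · simp only [hc, if_true]
      have : l ++ [y, x] ++ [x + y] = (l ++ [y]) ++ [x, x + y] := by simp
      rw [this, ih]
      simp [pvGen, hc]
    · simp [hc, pvGen]

lemma pvAltLoop_nonpos (fuel : Nat) (pos a b i : Int) (acc : List (Int × Int × Int))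
    (h : ¬ pos > 0) : pvAltLoop fuel pos a b i acc = acc := by
  cases fuel <;> simp [pvAltLoop, h]

-- Main loop correspondence: A's walk over its precomputed list equals B's rolling loop,
-- and A's leftover pos is ≤ 0 (so A's final extend branch is dead).
lemma pvMain (total : Int) :
    ∀ (fA fB : Nat) (a b pos i : Int) (acc : List (Int × Int × Int)),
      pos ≤ total → total < pvGenBound fA a b → 1 ≤ a → 1 ≤ b → fA + 1 ≤ fB →
      (pvSecLoopA (a :: b :: pvGen fA total a b) i pos acc).1 = pvAltLoop fB pos a b i acc ∧
      (pvSecLoopA (a :: b :: pvGen fA total a b) i pos acc).2 ≤ 0 := by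
  intro fA
  induction fA with
  | zero =>
    intro fB a b pos i acc hpt hgb ha hb hf
    obtain ⟨fB', rfl⟩ : ∃ k, fB = k + 1 := ⟨fB - 1, by omega⟩
    simp only [pvGenBound] at hgb
    by_cases hp : pos ≤ 0
    · simp [pvSecLoopA, pvAltLoop, hp, not_lt.mpr hp]
    · have hs : max 0 (pos - a) = 0 := by omega
      simp only [pvGen, pvSecLoopA, pvAltLoop, hp, if_pos (by omega : pos > 0), hs]
      rw [pvAltLoop_nonpos _ _ _ _ _ _ (by omega)]
      simp
  | succ f ih =>
    intro fB a b pos i acc hpt hgb ha hb hf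
    obtain ⟨fB', rfl⟩ : ∃ k, fB = k + 1 := ⟨fB - 1, by omega⟩
    by_cases hp : pos ≤ 0
    · simp [pvSecLoopA, pvAltLoop, hp, not_lt.mpr hp]
    · by_cases hc : a + b ≤ total
      · -- generator continues: peel one step and use the IH on (b, a+b)
        have hgen : pvGen (f + 1) total a b = (a + b) :: pvGen f total b (a + b) := by
          simp only [pvGen, add_comm b a]
          rw [if_pos hc]
        rw [hgen]
        simp only [pvSecLoopA, if_neg hp, pvAltLoop, if_pos (by omega : pos > 0)]
        exact ih fB' b (a + b) (max 0 (pos - a)) (i + 1) (acc ++ [(max 0 (pos - a), pos, i)])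
          (by omega) hgb hb (by omega) (by omega)
      · -- generator stops: the list is [a, b] and pos < a + b, so pos is gone in ≤ 2 steps
        have hgen : pvGen (f + 1) total a b = [] := by
          simp only [pvGen, add_comm b a]
          rw [if_neg hc]
        rw [hgen]
        by_cases hp2 : pos - a ≤ 0
        · have hs : max 0 (pos - a) = 0 := by omega
          simp only [pvSecLoopA, pvAltLoop, if_neg hp, if_pos (by omega : pos > 0), hs]
          rw [pvAltLoop_nonpos _ _ _ _ _ _ (by omega)]
          simp
        · have hs1 : max 0 (pos - a) = pos - a := by omega
          have hs2 : max 0 (pos - a - b) = 0 := by omega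
          obtain ⟨fB'', rfl⟩ : ∃ k, fB' = k + 1 := ⟨fB' - 1, by omega⟩
          simp only [pvSecLoopA, pvAltLoop, if_neg hp, if_pos (by omega : pos > 0), hs1,
            if_neg (by omega : pos - a ≤ 0 → False) , if_pos (by omega : pos - a > 0), hs2]
          rw [pvAltLoop_nonpos _ _ _ _ _ _ (by omega)]
          simp

lemma pvBound : (2147483648 : Int) < pvGenBound 64 1 2 := by decide

-- ===== VERDICT (by name: the statement is the Claim_ definition above) =====
theorem fibonacci_sections_spec : Claim_equal_fibonacci_sections := by
  intro total hdom
  have htot : total ≤ 2147483648 := by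
    simp [Dom_fibonacci_sections, pvDomInt] at hdom; omega
  unfold Spec_fibonacci_sections fibonacci_sections fibonacci_sections_alt
  have hfibs : pvFibLoopA 64 total [1, 2] = 1 :: 2 :: pvGen 64 total 1 2 := by
    have := pvFibLoopA_eq 64 total [] 1 2
    simpa using this
  rw [hfibs]
  obtain ⟨h1, h2⟩ := pvMain total 64 65 1 2 total 0 [] le_rfl
    (lt_of_le_of_lt htot pvBound) (by omega) (by omega) (by omega)
  simp only [h1]
  rw [if_neg (by intro h; exact absurd h.1 (by omega))]
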